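-- pv_equiv track=rewrite | github.com/pchaganti/ax-arise | benchmarks/datacorp/csv_format.py | gt_pivot_status_by_currency
-- ===== SOURCE A (Python) =====
-- def gt_pivot_status_by_currency(parsed: dict) -> dict[str, dict[str, int]]:
--     """Pivot table: currency × status → count of orders."""
--     result: dict[str, dict[str, int]] = {}
--     for row in parsed["rows"]:
--         currency = str(row.get("currency", ""))
--         status = str(row.get("status", ""))
--         if currency not in result:
--             result[currency] = {}
--         result[currency][status] = result[currency].get(status, 0) + 1
--     return result
-- ===== SOURCE B (Python) =====
-- def gt_pivot_status_by_currency(parsed: dict) -> dict[str, dict[str, int]]: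
--     """Pivot table: currency x status -> count of orders (dedup-then-count pipeline)."""
--     pairs = [(str(row.get("currency", "")), str(row.get("status", ""))) for row in parsed["rows"]]
--     result: dict[str, dict[str, int]] = {}
--     for pair in dict.fromkeys(pairs):
--         result.setdefault(pair[0], {})[pair[1]] = pairs.count(pair)
--     return result
-- ===== Notes on version B (the rewrite author's own statement) =====
-- stated objective: alternative
-- what changed: Replaced A's single incremental counting loop over a nested dict with a two-pass pipeline: flatten rows to (currency,status) pairs, deduplicate them in first-occurrence order with dict.fromkeys, then assign each distinct pair its total pairs.count in one shot.
import Mathlib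
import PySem

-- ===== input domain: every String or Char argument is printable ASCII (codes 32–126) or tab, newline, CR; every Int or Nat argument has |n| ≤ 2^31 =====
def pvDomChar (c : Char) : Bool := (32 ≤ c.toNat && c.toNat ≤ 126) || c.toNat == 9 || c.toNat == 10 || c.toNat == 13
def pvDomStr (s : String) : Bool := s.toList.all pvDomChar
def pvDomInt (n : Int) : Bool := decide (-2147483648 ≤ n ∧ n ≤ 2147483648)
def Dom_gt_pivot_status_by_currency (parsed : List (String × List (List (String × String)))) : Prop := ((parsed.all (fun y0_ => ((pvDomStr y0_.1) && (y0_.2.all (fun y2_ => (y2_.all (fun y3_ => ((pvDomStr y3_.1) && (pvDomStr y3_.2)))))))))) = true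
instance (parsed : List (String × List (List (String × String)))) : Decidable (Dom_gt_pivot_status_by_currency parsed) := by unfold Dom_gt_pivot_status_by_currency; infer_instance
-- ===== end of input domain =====

-- B replaces A's incremental nested-counter loop by a dedup-then-count pipeline over the flattened
-- (currency, status) pairs; same return value and order (alternative decomposition, no speed claim).


-- ===== PORT A =====
def gt_pivot_status_by_currency (parsed : List (String × List (List (String × String)))) : List (String × List (String × Int)) :=
  let rows := (PySem.Dict.mk parsed).getD "rows" []
  let result : PySem.Dict String (PySem.Dict String Int) :=
    rows.foldl (fun result row =>
      let currency := (PySem.Dict.mk row).getD "currency" ""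
      let status := (PySem.Dict.mk row).getD "status" ""
      let result := if result.contains currency then result else result.insert currency PySem.Dict.empty
      result.insert currency
        ((result.getD currency PySem.Dict.empty).insert status
          ((result.getD currency PySem.Dict.empty).getD status 0 + 1))) PySem.Dict.empty
  result.items.map (fun p => (p.1, p.2.items))

-- ===== PORT B =====
def gt_pivot_status_by_currency_alt (parsed : List (String × List (List (String × String)))) : List (String × List (String × Int)) :=
  let rows := (PySem.Dict.mk parsed).getD "rows" []
  let pairs := rows.map (fun row => ((PySem.Dict.mk row).getD "currency" "", (PySem.Dict.mk row).getD "status" ""))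
  let result : PySem.Dict String (PySem.Dict String Int) :=
    (PySem.List.dedup pairs).foldl (fun result p =>
      let result := result.setdefault p.1 PySem.Dict.empty
      result.insert p.1
        ((result.getD p.1 PySem.Dict.empty).insert p.2 ((PySem.List.count pairs p : Int)))) PySem.Dict.empty
  result.items.map (fun p => (p.1, p.2.items))


-- ===== PRECONDITION & SPEC =====
-- A raises KeyError when the "rows" key is absent from parsed; Pre_ requires that key to be present.
def Pre_gt_pivot_status_by_currency (parsed : List (String × List (List (String × String)))) : Prop :=
  (PySem.Dict.mk parsed).contains "rows" = true
instance (parsed : List (String × List (List (String × String)))) : Decidable (Pre_gt_pivot_status_by_currency parsed) := by unfold Pre_gt_pivot_status_by_currency; infer_instance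
def pvWitness_gt_pivot_status_by_currency : (List (String × List (List (String × String)))) := [("rows", [[("currency", "USD"), ("status", "paid")]])]
def Spec_gt_pivot_status_by_currency (parsed : List (String × List (List (String × String)))) (out : List (String × List (String × Int))) : Prop := out = gt_pivot_status_by_currency_alt parsed
instance (parsed : List (String × List (List (String × String)))) (out : List (String × List (String × Int))) : Decidable (Spec_gt_pivot_status_by_currency parsed out) := by unfold Spec_gt_pivot_status_by_currency; infer_instance

-- ===== CLAIM (what is proved, stated in full; the proofs are below) =====
def Claim_equal_gt_pivot_status_by_currency : Prop := ∀ (parsed : List (String × List (List (String × String)))), Dom_gt_pivot_status_by_currency parsed → Pre_gt_pivot_status_by_currency parsed → Spec_gt_pivot_status_by_currency parsed (gt_pivot_status_by_currency parsed)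

-- ===== LEMMAS AND PROOFS =====
def pvIns (d : PySem.Dict String (PySem.Dict String Int)) (p : String × String) (n : Int) :
    PySem.Dict String (PySem.Dict String Int) :=
  let d := if d.contains p.1 then d else d.insert p.1 PySem.Dict.empty
  d.insert p.1 ((d.getD p.1 PySem.Dict.empty).insert p.2 n)

theorem insert_comm_of_contains {κ ν : Type} [BEq κ] [LawfulBEq κ] (d : PySem.Dict κ ν)
    (k k' : κ) (v w : ν) (hk : d.contains k = true) (hne : k ≠ k') :
    (d.insert k' w).insert k v = (d.insert k v).insert k' w := by
  apply PySem.Dict.ext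
  have hbne : (k == k') = false := by simp [hne]
  have hbne' : (k' == k) = false := by simp [Ne.symm hne]
  have hk2 : (d.insert k' w).contains k = true := by
    rw [PySem.Dict.contains_insert]; simp [hk]
  by_cases hc' : d.contains k' = true
  · have hc2 : (d.insert k v).contains k' = true := by
      rw [PySem.Dict.contains_insert]; simp [hc']
    rw [PySem.Dict.items_insert_of_contains _ _ hk2, PySem.Dict.items_insert_of_contains _ _ hc',
        PySem.Dict.items_insert_of_contains _ _ hc2, PySem.Dict.items_insert_of_contains _ _ hk,
        List.map_map, List.map_map]
    refine List.map_congr_left fun x _ => ?_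
    by_cases h1 : x.1 = k <;> by_cases h2 : x.1 = k' <;>
      simp [Function.comp, h1, h2, hbne, hbne']
  · have hc'2 : d.contains k' = false := by simpa using hc'
    have hcr : (d.insert k v).contains k' = false := by
      rw [PySem.Dict.contains_insert]; simp [hc'2, hbne']
    rw [PySem.Dict.items_insert_of_contains _ _ hk2, PySem.Dict.items_insert_of_not_contains _ _ hc'2,
        PySem.Dict.items_insert_of_not_contains _ _ hcr, PySem.Dict.items_insert_of_contains _ _ hk,
        List.map_append]
    simp [hbne']

theorem pvIns_eq_insert (d : PySem.Dict String (PySem.Dict String Int)) (p : String × String) (n : Int) :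
    pvIns d p n = d.insert p.1 ((d.getD p.1 PySem.Dict.empty).insert p.2 n) := by
  by_cases hc : d.contains p.1 = true
  · simp [pvIns, hc]
  · have hc' : d.contains p.1 = false := by simpa using hc
    rw [PySem.Dict.getD_of_not_contains d _ hc']
    simp [pvIns, hc', PySem.Dict.getD_insert_self, PySem.Dict.insert_insert_self]
def pvGet (d : PySem.Dict String (PySem.Dict String Int)) (p : String × String) : Int :=
  (d.getD p.1 PySem.Dict.empty).getD p.2 0
def pvBuild (u : List (String × String)) (cnt : String × String → Int) :
    PySem.Dict String (PySem.Dict String Int) :=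
  u.foldl (fun d p => pvIns d p (cnt p)) PySem.Dict.empty
def pvPres (d : PySem.Dict String (PySem.Dict String Int)) (p : String × String) : Prop :=
  d.contains p.1 = true ∧ (d.getD p.1 PySem.Dict.empty).contains p.2 = true

theorem pvIns_pvIns_self (d : PySem.Dict String (PySem.Dict String Int)) (p : String × String) (m n : Int) :
    pvIns (pvIns d p m) p n = pvIns d p n := by
  rw [pvIns_eq_insert, pvIns_eq_insert, pvIns_eq_insert, PySem.Dict.getD_insert_self,
      PySem.Dict.insert_insert_self, PySem.Dict.insert_insert_self]

theorem pvIns_swap (d : PySem.Dict String (PySem.Dict String Int)) (p q : String × String) (m n : Int)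
    (hp : pvPres d p) (hne : p ≠ q) :
    pvIns (pvIns d q m) p n = pvIns (pvIns d p n) q m := by
  obtain ⟨h1, h2⟩ := hp
  rw [pvIns_eq_insert d q m, pvIns_eq_insert d p n]
  by_cases e1 : p.1 = q.1
  · have e2 : p.2 ≠ q.2 := by
      intro h; exact hne (Prod.ext e1 h)
    rw [pvIns_eq_insert, pvIns_eq_insert]
    rw [e1] at h1 h2 ⊢
    rw [PySem.Dict.getD_insert_self, PySem.Dict.getD_insert_self,
        PySem.Dict.insert_insert_self, PySem.Dict.insert_insert_self,
        insert_comm_of_contains _ p.2 q.2 n m h2 e2]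
  · rw [pvIns_eq_insert, pvIns_eq_insert]
    rw [PySem.Dict.getD_insert, PySem.Dict.getD_insert]
    rw [if_neg e1, if_neg (fun h => e1 h.symm)]
    exact insert_comm_of_contains d p.1 q.1 _ _ h1 e1
theorem pvGet_pvIns' (d : PySem.Dict String (PySem.Dict String Int)) (q p : String × String) (m : Int) :
    pvGet (pvIns d q m) p = if p = q then m else pvGet d p := by
  unfold pvGet
  rw [pvIns_eq_insert, PySem.Dict.getD_insert]
  by_cases h1 : p.1 = q.1
  · rw [if_pos h1, PySem.Dict.getD_insert]
    by_cases h2 : p.2 = q.2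
    · simp [h1, h2, Prod.ext_iff]
    · simp [h1, h2, Prod.ext_iff]
  · have hne : p ≠ q := fun he => h1 (by rw [he])
    simp [h1, hne]

theorem pvBuild_append (u : List (String × String)) (q : String × String) (cnt : String × String → Int) :
    pvBuild (u ++ [q]) cnt = pvIns (pvBuild u cnt) q (cnt q) := by
  simp [pvBuild, List.foldl_append]

theorem pvGet_pvBuild (u : List (String × String)) (cnt : String × String → Int) (p : String × String) :
    pvGet (pvBuild u cnt) p = if p ∈ u then cnt p else 0 := by
  induction u using List.reverseRecOn with
  | nil => simp [pvBuild, pvGet, PySem.Dict.getD_empty]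
  | append_singleton u q ih =>
    rw [pvBuild_append, pvGet_pvIns']
    by_cases h : p = q
    · simp [h]
    · simp [h, ih]

theorem pvBuild_congr (u : List (String × String)) (f g : String × String → Int)
    (h : ∀ p ∈ u, f p = g p) : pvBuild u f = pvBuild u g := by
  induction u using List.reverseRecOn with
  | nil => rfl
  | append_singleton u q ih =>
    rw [pvBuild_append, pvBuild_append, ih (fun p hp => h p (List.mem_append_left _ hp)),
        h q (List.mem_append_right _ (List.mem_singleton_self q))]

theorem pvPres_pvIns_self (d : PySem.Dict String (PySem.Dict String Int)) (q : String × String) (m : Int) :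
    pvPres (pvIns d q m) q := by
  rw [pvIns_eq_insert]
  refine ⟨?_, ?_⟩
  · rw [PySem.Dict.contains_insert]; simp
  · rw [PySem.Dict.getD_insert_self, PySem.Dict.contains_insert]; simp

theorem pvPres_pvIns_mono (d : PySem.Dict String (PySem.Dict String Int)) (q p : String × String) (m : Int)
    (h : pvPres d p) : pvPres (pvIns d q m) p := by
  obtain ⟨h1, h2⟩ := h
  rw [pvIns_eq_insert]
  refine ⟨by rw [PySem.Dict.contains_insert]; simp [h1], ?_⟩
  rw [PySem.Dict.getD_insert]
  by_cases e1 : p.1 = q.1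
  · rw [if_pos e1, PySem.Dict.contains_insert]
    rw [e1] at h2
    simp [h2]
  · rw [if_neg e1]; exact h2

theorem pvPres_pvBuild (u : List (String × String)) (cnt : String × String → Int) (p : String × String)
    (h : p ∈ u) : pvPres (pvBuild u cnt) p := by
  induction u using List.reverseRecOn with
  | nil => simp at h
  | append_singleton u q ih =>
    rw [pvBuild_append]
    rcases List.mem_append.mp h with hu | hq
    · exact pvPres_pvIns_mono _ _ _ _ (ih hu)
    · simp at hq; subst hq; exact pvPres_pvIns_self _ _ _

theorem pvIns_pvBuild_mem (u : List (String × String)) (cnt : String × String → Int)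
    (p : String × String) (n : Int) (hu : u.Nodup) (hp : p ∈ u) :
    pvIns (pvBuild u cnt) p n = pvBuild u (fun q => if q = p then n else cnt q) := by
  induction u using List.reverseRecOn with
  | nil => simp at hp
  | append_singleton u q ih =>
    have hsplit := List.nodup_append.mp hu
    have hu' : u.Nodup := hsplit.1
    rw [pvBuild_append, pvBuild_append]
    by_cases hpq : p = q
    · subst hpq
      have hpu : p ∉ u := fun hm =>
        (hsplit.2.2 p hm p (List.mem_singleton_self p)) rfl
      rw [pvIns_pvIns_self, if_pos rfl]
      exact congrArg (fun d => pvIns d p n)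
        (pvBuild_congr u cnt (fun r => if r = p then n else cnt r)
          (fun r hr => (if_neg (fun he : r = p => hpu (he ▸ hr))).symm))
    · have hpu : p ∈ u := by
        rcases List.mem_append.mp hp with h' | h'
        · exact h'
        · simp at h'; exact absurd h' hpq
      rw [pvIns_swap _ _ _ _ _ (pvPres_pvBuild u cnt p hpu) hpq, ih hu' hpu,
          if_neg (fun he => hpq he.symm)]

theorem pvIns_pvBuild_fresh (u : List (String × String)) (cnt : String × String → Int)
    (p : String × String) (n : Int) (hp : p ∉ u) :
    pvIns (pvBuild u cnt) p n = pvBuild (u ++ [p]) (fun q => if q = p then n else cnt q) := by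
  rw [pvBuild_append, if_pos rfl]
  exact congrArg (fun d => pvIns d p n)
    (pvBuild_congr u cnt (fun q => if q = p then n else cnt q)
      (fun r hr => (if_neg (fun he : r = p => hp (he ▸ hr))).symm))

theorem dedup_append_singleton (ps : List (String × String)) (p : String × String) :
    PySem.List.dedup (ps ++ [p]) =
      if p ∈ ps then PySem.List.dedup ps else PySem.List.dedup ps ++ [p] := by
  rw [PySem.List.dedup_eq_ofList, PySem.List.dedup_eq_ofList]
  show (ps ++ [p]).foldl PySem.Set.add PySem.Set.empty = _
  rw [List.foldl_append]
  show PySem.Set.add (PySem.Set.ofList ps) p = _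
  unfold PySem.Set.add
  have hc : (PySem.Set.ofList ps).contains p = decide (p ∈ ps) := by
    simp [PySem.Set.contains, List.contains_eq_mem, PySem.Set.mem_ofList]
  rw [hc]
  by_cases h : p ∈ ps
  · simp [h]
  · simp [h]

theorem pvMain (ps : List (String × String)) :
    ps.foldl (fun d p => pvIns d p (pvGet d p + 1)) PySem.Dict.empty =
      pvBuild (PySem.List.dedup ps) (fun q => ((ps.count q : Nat) : Int)) := by
  induction ps using List.reverseRecOn with
  | nil => rfl
  | append_singleton ps p ih =>
    rw [List.foldl_append]
    simp only [List.foldl_cons, List.foldl_nil]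
    rw [ih, pvGet_pvBuild, dedup_append_singleton]
    by_cases h : p ∈ ps
    · rw [if_pos ((PySem.List.mem_dedup ps p).mpr h), if_pos h]
      rw [pvIns_pvBuild_mem _ _ _ _ (PySem.List.nodup_dedup ps) ((PySem.List.mem_dedup ps p).mpr h)]
      refine pvBuild_congr _ _ _ (fun r hr => ?_)
      by_cases hrp : r = p
      · subst hrp; simp [List.count_append]
      · rw [if_neg hrp]
        have : List.count r [p] = 0 := by
          simp [List.count_singleton]
          intro he; exact absurd he.symm hrp
        simp [List.count_append, this]
    · have hnd : p ∉ PySem.List.dedup ps := fun hm => h ((PySem.List.mem_dedup ps p).mp hm)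
      rw [if_neg hnd, if_neg h, zero_add]
      rw [pvIns_pvBuild_fresh _ _ _ _ hnd]
      refine pvBuild_congr _ _ _ (fun r hr => ?_)
      by_cases hrp : r = p
      · subst hrp
        simp [List.count_append, List.count_eq_zero.mpr h]
      · rw [if_neg hrp]
        have : List.count r [p] = 0 := by
          simp [List.count_singleton]
          intro he; exact absurd he.symm hrp
        simp [List.count_append, this]
theorem stepA_pair (d : PySem.Dict String (PySem.Dict String Int)) (c s : String) :
    (let result := if d.contains c then d else d.insert c PySem.Dict.empty
     result.insert c ((result.getD c PySem.Dict.empty).insert s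
       ((result.getD c PySem.Dict.empty).getD s 0 + 1)))
    = pvIns d (c, s) (pvGet d (c, s) + 1) := by
  by_cases hc : d.contains c = true
  · simp [pvIns, pvGet, hc]
  · have hc' : d.contains c = false := by simpa using hc
    simp [pvIns, pvGet, hc', PySem.Dict.getD_insert_self, PySem.Dict.getD_of_not_contains d _ hc']

theorem stepB_pair (d : PySem.Dict String (PySem.Dict String Int)) (p : String × String) (n : Int) :
    (let result := d.setdefault p.1 PySem.Dict.empty
     result.insert p.1 ((result.getD p.1 PySem.Dict.empty).insert p.2 n))
    = pvIns d p n := by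
  by_cases hc : d.contains p.1 = true
  · simp [pvIns, hc, PySem.Dict.setdefault_of_contains _ _ hc]
  · have hc' : d.contains p.1 = false := by simpa using hc
    simp [pvIns, hc', PySem.Dict.setdefault_of_not_contains _ _ hc']

theorem ports_agree (parsed : List (String × List (List (String × String)))) :
    gt_pivot_status_by_currency parsed = gt_pivot_status_by_currency_alt parsed := by
  unfold gt_pivot_status_by_currency gt_pivot_status_by_currency_alt
  refine congrArg (fun d : PySem.Dict String (PySem.Dict String Int) =>
    d.items.map (fun p => (p.1, p.2.items))) ?_
  set rows := (PySem.Dict.mk parsed).getD "rows" [] with hrows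
  set pairs := rows.map (fun row => ((PySem.Dict.mk row).getD "currency" "", (PySem.Dict.mk row).getD "status" "")) with hpairs
  have hfunA : (fun (result : PySem.Dict String (PySem.Dict String Int)) (row : List (String × String)) =>
      let currency := (PySem.Dict.mk row).getD "currency" ""
      let status := (PySem.Dict.mk row).getD "status" ""
      let result := if result.contains currency then result else result.insert currency PySem.Dict.empty
      result.insert currency
        ((result.getD currency PySem.Dict.empty).insert status
          ((result.getD currency PySem.Dict.empty).getD status 0 + 1)))
      = (fun d row => pvIns d ((PySem.Dict.mk row).getD "currency" "", (PySem.Dict.mk row).getD "status" "")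
          (pvGet d ((PySem.Dict.mk row).getD "currency" "", (PySem.Dict.mk row).getD "status" "") + 1)) :=
    funext fun d => funext fun row => stepA_pair d _ _
  have hfunB : (fun (result : PySem.Dict String (PySem.Dict String Int)) (p : String × String) =>
      let result := result.setdefault p.1 PySem.Dict.empty
      result.insert p.1
        ((result.getD p.1 PySem.Dict.empty).insert p.2 ((PySem.List.count pairs p : Int))))
      = (fun d p => pvIns d p ((pairs.count p : Nat) : Int)) :=
    funext fun d => funext fun p => by rw [stepB_pair, PySem.List.count_eq]
  rw [hfunA, hfunB, hpairs]
  have key := pvMain (rows.map (fun row => ((PySem.Dict.mk row).getD "currency" "", (PySem.Dict.mk row).getD "status" "")))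
  rw [List.foldl_map] at key
  exact key

-- ===== VERDICT (by name: the statement is the Claim_ definition above) =====
theorem gt_pivot_status_by_currency_spec : Claim_equal_gt_pivot_status_by_currency := by
  intro parsed _ _
  unfold Spec_gt_pivot_status_by_currency
  exact ports_agree parsed
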